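-- pv_equiv track=rewrite | github.com/UKPLab/acl2026-misviz | src/model_tuning/utils.py | extract_split_and_indices
-- ===== SOURCE A (Python) =====
-- def extract_split_and_indices(data_to_split):
--     val_indices = []
--     train_indices = []
--     small_train_indices = []
--     test_indices = []
--
--     for i, entry in enumerate(data_to_split):
--         if entry["split"] == "val":
--             val_indices.append(i)
--         elif "train" in entry["split"]:
--             train_indices.append(i)
--         elif entry["split"] == "test":
--             test_indices.append(i)
--         elif entry["split"] == "train small":
--             small_train_indices.append(i)
--
--     return {
--         "train": train_indices,
--         "val": val_indices,
--         "test": test_indices,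
--         "train_small": small_train_indices,
--     }
-- ===== SOURCE B (Python) =====
-- def extract_split_and_indices(data_to_split):
--     # Four independent comprehensions instead of one elif-chain loop.
--     # train uses the substring test (so it also catches "train small");
--     # the "train small" bucket of the original is unreachable, hence [].
--     return {
--         "train": [i for i, e in enumerate(data_to_split) if "train" in e["split"]],
--         "val": [i for i, e in enumerate(data_to_split) if e["split"] == "val"],
--         "test": [i for i, e in enumerate(data_to_split) if e["split"] == "test"],
--         "train_small": [],
--     }
-- ===== Notes on version B (the rewrite author's own statement) =====
-- stated objective: idiomatic
-- what changed: Replaces the single elif-chain accumulator loop with four independent list comprehensions (train keeps the substring test; the original's unreachable 'train small' branch becomes a literal empty list).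
import Mathlib
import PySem

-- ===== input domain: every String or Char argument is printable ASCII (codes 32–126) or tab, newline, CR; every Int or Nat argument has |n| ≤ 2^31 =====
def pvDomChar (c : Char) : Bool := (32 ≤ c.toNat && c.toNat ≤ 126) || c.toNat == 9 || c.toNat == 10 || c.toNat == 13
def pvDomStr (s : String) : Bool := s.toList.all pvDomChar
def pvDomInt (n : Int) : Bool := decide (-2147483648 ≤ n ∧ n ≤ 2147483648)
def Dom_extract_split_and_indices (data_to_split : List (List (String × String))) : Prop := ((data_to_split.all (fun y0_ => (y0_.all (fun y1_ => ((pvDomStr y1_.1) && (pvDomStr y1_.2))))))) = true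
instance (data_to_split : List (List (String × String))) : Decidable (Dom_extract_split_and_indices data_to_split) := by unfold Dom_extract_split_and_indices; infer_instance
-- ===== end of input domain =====

-- B replaces A's elif-chain loop by four independent comprehensions (idiomatic decomposition, same cost).

-- ===== PORT A =====
-- entry["split"] (KeyError when absent is excluded by Pre_)
def pvSplitOf (e : List (String × String)) : String := ((PySem.Dict.mk e).get? "split").getD ""

def pvStepA (st : List Int × List Int × List Int × List Int) (p : Int × List (String × String)) :
    List Int × List Int × List Int × List Int :=
  let s := pvSplitOf p.2
  if s = "val" then (st.1 ++ [p.1], st.2.1, st.2.2.1, st.2.2.2)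
  else if PySem.Str.isIn "train" s then (st.1, st.2.1 ++ [p.1], st.2.2.1, st.2.2.2)
  else if s = "test" then (st.1, st.2.1, st.2.2.1 ++ [p.1], st.2.2.2)
  else if s = "train small" then (st.1, st.2.1, st.2.2.1, st.2.2.2 ++ [p.1])
  else st

def extract_split_and_indices (data_to_split : List (List (String × String))) : List (String × List Int) :=
  let r := (PySem.List.enumerate data_to_split 0).foldl pvStepA ([], [], [], [])
  [("train", r.2.1), ("val", r.1), ("test", r.2.2.1), ("train_small", r.2.2.2)]

-- ===== PORT B =====
def extract_split_and_indices_alt (data_to_split : List (List (String × String))) : List (String × List Int) :=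
  let en := PySem.List.enumerate data_to_split 0
  [("train", en.filterMap (fun p => if PySem.Str.isIn "train" (pvSplitOf p.2) then some p.1 else none)),
   ("val", en.filterMap (fun p => if pvSplitOf p.2 = "val" then some p.1 else none)),
   ("test", en.filterMap (fun p => if pvSplitOf p.2 = "test" then some p.1 else none)),
   ("train_small", [])]

-- ===== PRECONDITION & SPEC =====
-- Pre_ excludes entries missing the "split" key, on which Python A raises KeyError.
def Pre_extract_split_and_indices (data_to_split : List (List (String × String))) : Prop :=
  (data_to_split.all (fun e => (PySem.Dict.mk e).contains "split")) = true
instance (data_to_split : List (List (String × String))) : Decidable (Pre_extract_split_and_indices data_to_split) := by unfold Pre_extract_split_and_indices; infer_instance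
def pvWitness_extract_split_and_indices : (List (List (String × String))) :=
  [[("split", "val")], [("split", "train small")], [("split", "test")], [("split", "train")]]

def Spec_extract_split_and_indices (data_to_split : List (List (String × String))) (out : List (String × List Int)) : Prop := out = extract_split_and_indices_alt data_to_split
instance (data_to_split : List (List (String × String))) (out : List (String × List Int)) : Decidable (Spec_extract_split_and_indices data_to_split out) := by unfold Spec_extract_split_and_indices; infer_instance

-- ===== CLAIM (what is proved, stated in full; the proofs are below) =====
def Claim_equal_extract_split_and_indices : Prop := ∀ (data_to_split : List (List (String × String))), Dom_extract_split_and_indices data_to_split → Pre_extract_split_and_indices data_to_split → Spec_extract_split_and_indices data_to_split (extract_split_and_indices data_to_split)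

-- ===== LEMMAS AND PROOFS =====

theorem pv_loop (l : List (Int × List (String × String))) (v t te ts : List Int) :
    l.foldl pvStepA (v, t, te, ts) =
      (v ++ l.filterMap (fun p => if pvSplitOf p.2 = "val" then some p.1 else none),
       t ++ l.filterMap (fun p => if PySem.Str.isIn "train" (pvSplitOf p.2) then some p.1 else none),
       te ++ l.filterMap (fun p => if pvSplitOf p.2 = "test" then some p.1 else none),
       ts) := by
  induction l generalizing v t te ts with
  | nil => simp
  | cons p l ih =>
    simp only [List.foldl_cons, List.filterMap_cons, pvStepA]
    by_cases hv : pvSplitOf p.2 = "val"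
    · have hc : PySem.Chars.isIn ['t', 'r', 'a', 'i', 'n'] ['v', 'a', 'l'] = false := by decide
      simp [hv, hc, ih]
    · by_cases htr : PySem.Str.isIn "train" (pvSplitOf p.2) = true
      · have hv' : pvSplitOf p.2 ≠ "val" := hv
        have htrc : PySem.Chars.isIn ['t', 'r', 'a', 'i', 'n'] (pvSplitOf p.2).toList = true := htr
        have hte' : pvSplitOf p.2 ≠ "test" := by
          intro h; rw [h] at htr; exact absurd htr (by decide)
        simp [htrc, hv', hte', ih]
      · rw [Bool.not_eq_true, PySem.Str.isIn_eq] at htr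
        have htr' : PySem.Chars.isIn ['t', 'r', 'a', 'i', 'n'] (pvSplitOf p.2).toList = false := htr
        by_cases hte : pvSplitOf p.2 = "test"
        · have hc : PySem.Chars.isIn ['t', 'r', 'a', 'i', 'n'] ['t', 'e', 's', 't'] = false := by decide
          simp [hte, hc, ih]
        · have hsm : ¬ pvSplitOf p.2 = "train small" := by
            intro h; rw [h] at htr; exact absurd htr (by decide)
          simp [hv, htr', hte, hsm, ih]

-- ===== VERDICT (by name: the statement is the Claim_ definition above) =====
theorem extract_split_and_indices_spec : Claim_equal_extract_split_and_indices := by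
  intro data _ _
  unfold Spec_extract_split_and_indices extract_split_and_indices extract_split_and_indices_alt
  rw [pv_loop]
  simp
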